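-- pv_equiv track=rewrite | github.com/scheott/SoloTabGen | Search_Generator.py | path_to_tabs
-- ===== SOURCE A (Python) =====
-- def path_to_tabs(path):
--     tab_lines = ["e|", "B|", "G|", "D|", "A|", "E|"]
--     string_indices = {"e": 0, "B": 1, "G": 2, "D": 3, "A": 4, "E": 5}
--     for string, fret in path:
--         for i in range(len(tab_lines)):
--             if i == string_indices[string]:
--                 tab_lines[i] += f"--{fret}"
--             else:
--                 tab_lines[i] += "--"
--     return "\n".join(tab_lines)
-- ===== SOURCE B (Python) =====
-- def path_to_tabs(path):
--     names = ["e", "B", "G", "D", "A", "E"]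
--     cols = []
--     for string, fret in path:
--         col = ["--"] * 6
--         col[names.index(string)] += str(fret)
--         cols.append(col)
--     return "\n".join(names[i] + "|" + "".join(col[i] for col in cols) for i in range(6))
-- ===== Notes on version B (the rewrite author's own statement) =====
-- stated objective: alternative
-- what changed: B drops the string_indices dict and A's simultaneous in-place update of six growing line strings: it builds one 6-entry column per note, then transposes, concatenating each row's column segments and joining the six finished lines.
import Mathlib
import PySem

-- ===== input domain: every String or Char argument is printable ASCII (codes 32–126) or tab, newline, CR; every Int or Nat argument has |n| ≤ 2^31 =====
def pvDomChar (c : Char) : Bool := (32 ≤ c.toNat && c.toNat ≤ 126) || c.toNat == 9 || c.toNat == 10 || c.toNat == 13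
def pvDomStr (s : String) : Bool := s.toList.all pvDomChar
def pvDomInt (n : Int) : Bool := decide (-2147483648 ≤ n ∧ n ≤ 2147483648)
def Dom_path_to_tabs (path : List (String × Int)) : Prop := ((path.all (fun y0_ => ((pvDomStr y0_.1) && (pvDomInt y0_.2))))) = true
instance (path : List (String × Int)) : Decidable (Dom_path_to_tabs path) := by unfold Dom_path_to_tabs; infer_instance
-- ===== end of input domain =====

-- B replaces A's simultaneous in-place update of six growing line strings (keyed by a
-- string→index dict) with a column-wise construction: one 6-entry column per note, then a
-- transpose that concatenates each row's segments (objective: alternative decomposition).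

-- ===== PORT A =====
def pvStringIndices : PySem.Dict String Int :=
  PySem.Dict.ofList [("e", 0), ("B", 1), ("G", 2), ("D", 3), ("A", 4), ("E", 5)]

-- inner 'for i in range(len(tab_lines))' loop of A; a missing key (KeyError, outside
-- Pre_) is ported as getD with -1, which never matches an index
def pvStepA (lines : List String) (p : String × Int) : List String :=
  (PySem.List.pyRange 0 (Int.ofNat lines.length) 1).foldl
    (fun ls i =>
      if i == PySem.Dict.getD pvStringIndices p.1 (-1) then
        ls.set i.toNat ((ls.getD i.toNat "") ++ "--" ++ PySem.Int.toStr p.2)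
      else
        ls.set i.toNat ((ls.getD i.toNat "") ++ "--")) lines

def path_to_tabs (path : List (String × Int)) : String :=
  PySem.Str.join "\n" (path.foldl pvStepA ["e|", "B|", "G|", "D|", "A|", "E|"])

-- ===== PORT B =====
def pvNames : List String := ["e", "B", "G", "D", "A", "E"]

-- one column of the tab: ["--"]*6 with str(fret) appended at names.index(string)
-- (names.index raises ValueError on an unknown string — outside Pre_; ported as no-op)
def pvCol (p : String × Int) : List String :=
  let col := List.replicate 6 "--"
  match PySem.List.index? pvNames p.1 with
  | some i => col.set i ((col.getD i "") ++ PySem.Int.toStr p.2)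
  | none => col

def path_to_tabs_alt (path : List (String × Int)) : String :=
  let cols := path.map pvCol
  PySem.Str.join "\n"
    ((PySem.List.pyRange 0 6 1).map (fun i =>
      (pvNames.getD i.toNat "") ++ "|" ++
        PySem.Str.join "" (cols.map (fun col => col.getD i.toNat ""))))

-- ===== PRECONDITION & SPEC =====
-- Pre_ excludes exactly the inputs where Python A raises KeyError (and B ValueError): a
-- pair whose string name is not one of the six guitar strings.
def Pre_path_to_tabs (path : List (String × Int)) : Prop :=
  ∀ p ∈ path, p.1 ∈ (["e", "B", "G", "D", "A", "E"] : List String)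
instance (path : List (String × Int)) : Decidable (Pre_path_to_tabs path) := by
  unfold Pre_path_to_tabs; infer_instance

def pvWitness_path_to_tabs : (List (String × Int)) := [("e", 3), ("D", 11), ("E", 0)]

def Spec_path_to_tabs (path : List (String × Int)) (out : String) : Prop := out = path_to_tabs_alt path
instance (path : List (String × Int)) (out : String) : Decidable (Spec_path_to_tabs path out) := by unfold Spec_path_to_tabs; infer_instance

-- ===== CLAIM (what is proved, stated in full; the proofs are below) =====
def Claim_equal_path_to_tabs : Prop := ∀ (path : List (String × Int)), Dom_path_to_tabs path → Pre_path_to_tabs path → Spec_path_to_tabs path (path_to_tabs path)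

-- ===== LEMMAS AND PROOFS =====

-- ''.join over a cons peels off its head
lemma pv_join_empty_cons (x : String) (xs : List String) :
    PySem.Str.join "" (x :: xs) = x ++ PySem.Str.join "" xs := by
  cases xs with
  | nil => simp [PySem.Str.join, PySem.Chars.join_singleton, PySem.Chars.join_nil, String.append_empty]
  | cons y ys => simp [PySem.Str.join, PySem.Chars.join_cons_cons]

-- row i of B's transpose: the concatenation of the i-th entry of every column
def pvColStr (i : Nat) (path : List (String × Int)) : String :=
  PySem.Str.join "" ((path.map pvCol).map (fun col => col.getD i ""))

-- invariant: A's simultaneous fold over the path produces exactly B's six transposed rows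
lemma pv_inv (path : List (String × Int))
    (h : ∀ p ∈ path, p.1 ∈ (["e", "B", "G", "D", "A", "E"] : List String))
    (a b c d e f : String) :
    path.foldl pvStepA [a, b, c, d, e, f] =
      [a ++ pvColStr 0 path, b ++ pvColStr 1 path, c ++ pvColStr 2 path,
       d ++ pvColStr 3 path, e ++ pvColStr 4 path, f ++ pvColStr 5 path] := by
  induction path generalizing a b c d e f with
  | nil =>
    simp [pvColStr, show PySem.Str.join "" ([] : List String) = "" from by decide,
      String.append_empty]
  | cons p rest ih =>
    obtain ⟨s, fret⟩ := p
    have hs := h (s, fret) (List.mem_cons_self ..)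
    have hrest : ∀ q ∈ rest, q.1 ∈ (["e", "B", "G", "D", "A", "E"] : List String) :=
      fun q hq => h q (List.mem_cons_of_mem _ hq)
    simp only [List.mem_cons, List.not_mem_nil, or_false] at hs
    rcases hs with rfl | rfl | rfl | rfl | rfl | rfl
    · simp only [List.foldl_cons]
      rw [show pvStepA [a, b, c, d, e, f] ("e", fret) = [a ++ "--" ++ PySem.Int.toStr fret, b ++ "--", c ++ "--", d ++ "--", e ++ "--", f ++ "--"] from by
        simp [pvStepA, show PySem.List.pyRange 0 6 1 = [0, 1, 2, 3, 4, 5] from by decide,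
          show pvStringIndices.getD "e" (-1) = 0 from by decide]]
      rw [ih hrest]
      simp only [pvColStr, List.map_cons,
        show pvCol ("e", fret) = ["--" ++ PySem.Int.toStr fret, "--", "--", "--", "--", "--"] from rfl]
      simp [pv_join_empty_cons, String.append_assoc]
    · simp only [List.foldl_cons]
      rw [show pvStepA [a, b, c, d, e, f] ("B", fret) = [a ++ "--", b ++ "--" ++ PySem.Int.toStr fret, c ++ "--", d ++ "--", e ++ "--", f ++ "--"] from by
        simp [pvStepA, show PySem.List.pyRange 0 6 1 = [0, 1, 2, 3, 4, 5] from by decide,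
          show pvStringIndices.getD "B" (-1) = 1 from by decide]]
      rw [ih hrest]
      simp only [pvColStr, List.map_cons,
        show pvCol ("B", fret) = ["--", "--" ++ PySem.Int.toStr fret, "--", "--", "--", "--"] from rfl]
      simp [pv_join_empty_cons, String.append_assoc]
    · simp only [List.foldl_cons]
      rw [show pvStepA [a, b, c, d, e, f] ("G", fret) = [a ++ "--", b ++ "--", c ++ "--" ++ PySem.Int.toStr fret, d ++ "--", e ++ "--", f ++ "--"] from by
        simp [pvStepA, show PySem.List.pyRange 0 6 1 = [0, 1, 2, 3, 4, 5] from by decide,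
          show pvStringIndices.getD "G" (-1) = 2 from by decide]]
      rw [ih hrest]
      simp only [pvColStr, List.map_cons,
        show pvCol ("G", fret) = ["--", "--", "--" ++ PySem.Int.toStr fret, "--", "--", "--"] from rfl]
      simp [pv_join_empty_cons, String.append_assoc]
    · simp only [List.foldl_cons]
      rw [show pvStepA [a, b, c, d, e, f] ("D", fret) = [a ++ "--", b ++ "--", c ++ "--", d ++ "--" ++ PySem.Int.toStr fret, e ++ "--", f ++ "--"] from by
        simp [pvStepA, show PySem.List.pyRange 0 6 1 = [0, 1, 2, 3, 4, 5] from by decide,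
          show pvStringIndices.getD "D" (-1) = 3 from by decide]]
      rw [ih hrest]
      simp only [pvColStr, List.map_cons,
        show pvCol ("D", fret) = ["--", "--", "--", "--" ++ PySem.Int.toStr fret, "--", "--"] from rfl]
      simp [pv_join_empty_cons, String.append_assoc]
    · simp only [List.foldl_cons]
      rw [show pvStepA [a, b, c, d, e, f] ("A", fret) = [a ++ "--", b ++ "--", c ++ "--", d ++ "--", e ++ "--" ++ PySem.Int.toStr fret, f ++ "--"] from by
        simp [pvStepA, show PySem.List.pyRange 0 6 1 = [0, 1, 2, 3, 4, 5] from by decide,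
          show pvStringIndices.getD "A" (-1) = 4 from by decide]]
      rw [ih hrest]
      simp only [pvColStr, List.map_cons,
        show pvCol ("A", fret) = ["--", "--", "--", "--", "--" ++ PySem.Int.toStr fret, "--"] from rfl]
      simp [pv_join_empty_cons, String.append_assoc]
    · simp only [List.foldl_cons]
      rw [show pvStepA [a, b, c, d, e, f] ("E", fret) = [a ++ "--", b ++ "--", c ++ "--", d ++ "--", e ++ "--", f ++ "--" ++ PySem.Int.toStr fret] from by
        simp [pvStepA, show PySem.List.pyRange 0 6 1 = [0, 1, 2, 3, 4, 5] from by decide,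
          show pvStringIndices.getD "E" (-1) = 5 from by decide]]
      rw [ih hrest]
      simp only [pvColStr, List.map_cons,
        show pvCol ("E", fret) = ["--", "--", "--", "--", "--", "--" ++ PySem.Int.toStr fret] from rfl]
      simp [pv_join_empty_cons, String.append_assoc]

theorem path_to_tabs_spec : Claim_equal_path_to_tabs := by
  intro path _ hpre
  unfold Spec_path_to_tabs path_to_tabs path_to_tabs_alt
  rw [pv_inv path hpre]
  simp only [show PySem.List.pyRange 0 6 1 = [0, 1, 2, 3, 4, 5] from by decide,
    List.map_cons, List.map_nil]
  simp only [pvColStr]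
  norm_num [pvNames, String.append_assoc, show Int.toNat 2 = 2 from rfl, show Int.toNat 3 = 3 from rfl, show Int.toNat 4 = 4 from rfl, show Int.toNat 5 = 5 from rfl,
    show ("e" : String) ++ "|" = "e|" from by decide,
    show ("B" : String) ++ "|" = "B|" from by decide,
    show ("G" : String) ++ "|" = "G|" from by decide,
    show ("D" : String) ++ "|" = "D|" from by decide,
    show ("A" : String) ++ "|" = "A|" from by decide,
    show ("E" : String) ++ "|" = "E|" from by decide]
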